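-- pv_equiv track=rewrite | github.com/thenikhilsharma/python | CP/December Challenge2021/#6PyramidTraversal.py | get_level_index_tuple
-- ===== SOURCE A (Python) =====
-- from math import ceil, sqrt
--
-- def get_last_node(level):
--     return ((level + 1) * level) // 2
--
-- def get_level_index_tuple(n):
--     i = -1000
--     l = -1000
--
--     if n == 1:
--         return (1, 1)
--
--     finish = 1 + ceil(sqrt(n * 2))  # check if need to sign for long long somehow
--     begin = 2
--
--     while (begin <= finish):
--         l = (begin + finish) // 2
--         last = get_last_node(l)
--         if (last >= n and get_last_node(l - 1) < n):
--             break
--         elif last > n: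
--             finish = l - 1
--         else:
--             begin = l + 1
--
--     i = n - (l * (l - 1)) // 2
--     return (l, i)
-- ===== SOURCE B (Python) =====
-- from math import isqrt
--
-- def get_level_index_tuple(n):
--     l = (isqrt(8 * n + 1) - 1) // 2
--     if l * (l + 1) // 2 < n:
--         l += 1
--     return (l, n - l * (l - 1) // 2)
-- ===== Notes on version B (the rewrite author's own statement) =====
-- stated objective: simpler
-- what changed: Replaces A's binary-search loop over levels (with a float-sqrt-derived upper bound and an n==1 special case) by a direct closed-form level from math.isqrt(8*n+1) with one exact integer correction step.
-- intended difference: At n = 0 A's loop body never runs and it returns the leftover sentinels (-1000, -500500), which is not a pyramid position; B returns the consistent closed-form value (0, 0). — e.g. on get_level_index_tuple(0): A returns (-1000, -500500), B returns (0, 0)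
import Mathlib
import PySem

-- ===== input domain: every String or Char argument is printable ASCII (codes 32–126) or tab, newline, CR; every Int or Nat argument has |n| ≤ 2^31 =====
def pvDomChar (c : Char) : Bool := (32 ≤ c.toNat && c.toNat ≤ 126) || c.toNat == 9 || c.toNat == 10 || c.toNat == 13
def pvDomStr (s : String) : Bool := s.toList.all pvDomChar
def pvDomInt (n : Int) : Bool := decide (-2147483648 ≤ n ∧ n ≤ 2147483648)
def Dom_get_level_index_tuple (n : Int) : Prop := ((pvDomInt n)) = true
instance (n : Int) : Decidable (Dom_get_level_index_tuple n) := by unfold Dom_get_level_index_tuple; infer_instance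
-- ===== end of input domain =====

-- B replaces A's binary-search loop by a closed-form level from math.isqrt; objective: simpler.

-- ===== PORT A =====
def get_last_node (level : Int) : Int := PySem.Int.floordiv ((level + 1) * level) 2

-- ceil(sqrt(m)) for integer m ≥ 0: Python computes ceil(math.sqrt(m)) in floats; for
-- m ≤ 2^33 (guaranteed by Dom: m = n*2, |n| ≤ 2^31) the correctly rounded double sqrt
-- can never cross an integer, so the exact integer ceiling below coincides with it.
def pvCeilSqrt (m : Int) : Int :=
  let s : Int := Int.sqrt m
  if s * s = m then s else s + 1

-- A's while-loop, step for step; returns the last value of l (initially -1000).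
def loopA (n b f l : Int) : Int :=
  if hbf : b ≤ f then
    let l' := PySem.Int.floordiv (b + f) 2
    let last := get_last_node l'
    if last ≥ n ∧ get_last_node (l' - 1) < n then l'
    else if last > n then loopA n b (l' - 1) l'
    else loopA n (l' + 1) f l'
  else l
termination_by (f + 1 - b).toNat
decreasing_by
  · have h := PySem.Int.floordiv_two_mid_bounds hbf
    omega
  · have h := PySem.Int.floordiv_two_mid_bounds hbf
    omega

def get_level_index_tuple (n : Int) : Int × Int :=
  if n = 1 then (1, 1)
  else
    let finish := 1 + pvCeilSqrt (n * 2)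
    let l := loopA n 2 finish (-1000)
    (l, n - PySem.Int.floordiv (l * (l - 1)) 2)

-- ===== PORT B =====
-- math.isqrt m (m ≥ 0, guaranteed by Pre_) is Int.sqrt m; for m < 0 Python raises ValueError.
def get_level_index_tuple_alt (n : Int) : Int × Int :=
  let l0 := PySem.Int.floordiv (Int.sqrt (8 * n + 1) - 1) 2
  let l := if PySem.Int.floordiv (l0 * (l0 + 1)) 2 < n then l0 + 1 else l0
  (l, n - PySem.Int.floordiv (l * (l - 1)) 2)

-- ===== PRECONDITION & SPEC =====
-- Pre_ excludes n < 0, where both A (math.sqrt) and B (math.isqrt) raise ValueError.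
def Pre_get_level_index_tuple (n : Int) : Prop := 0 ≤ n
instance (n : Int) : Decidable (Pre_get_level_index_tuple n) := by unfold Pre_get_level_index_tuple; infer_instance
def pvWitness_get_level_index_tuple : Int := 5

-- At n = 0 A's loop never runs and it returns its leftover sentinels (-1000, -500500),
-- not a pyramid position; B returns the consistent closed-form value (0, 0).
def D_get_level_index_tuple (n : Int) : Prop := n = 0
instance (n : Int) : Decidable (D_get_level_index_tuple n) := by unfold D_get_level_index_tuple; infer_instance

def Spec_get_level_index_tuple (n : Int) (out : Int × Int) : Prop := ¬ D_get_level_index_tuple n → out = get_level_index_tuple_alt n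
instance (n : Int) (out : Int × Int) : Decidable (Spec_get_level_index_tuple n out) := by unfold Spec_get_level_index_tuple; infer_instance

def pvDiffWitness_get_level_index_tuple : Int := 0
def pvDiffWitnessOut_get_level_index_tuple : (Int × Int) × (Int × Int) := ((-1000, -500500), (0, 0))

-- ===== CLAIM (what is proved, stated in full; the proofs are below) =====
def Claim_unchanged_get_level_index_tuple : Prop := ∀ (n : Int), Dom_get_level_index_tuple n → Pre_get_level_index_tuple n → Spec_get_level_index_tuple n (get_level_index_tuple n)
def Claim_changed_get_level_index_tuple : Prop := Dom_get_level_index_tuple (pvDiffWitness_get_level_index_tuple) ∧ Pre_get_level_index_tuple (pvDiffWitness_get_level_index_tuple) ∧ D_get_level_index_tuple (pvDiffWitness_get_level_index_tuple) ∧ get_level_index_tuple (pvDiffWitness_get_level_index_tuple) = pvDiffWitnessOut_get_level_index_tuple.1 ∧ get_level_index_tuple_alt (pvDiffWitness_get_level_index_tuple) = pvDiffWitnessOut_get_level_index_tuple.2 ∧ pvDiffWitnessOut_get_level_index_tuple.1 ≠ pvDiffWitnessOut_get_level_index_tuple.2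
def Claim_exact_get_level_index_tuple : Prop := ∀ (n : Int), Dom_get_level_index_tuple n → Pre_get_level_index_tuple n → D_get_level_index_tuple n → get_level_index_tuple n ≠ get_level_index_tuple_alt n

-- ===== LEMMAS AND PROOFS =====

theorem isqrt_le (n : Int) (h : 0 ≤ n) : Int.sqrt n * Int.sqrt n ≤ n := by
  have h1 : ((n.toNat.sqrt : Int)) * n.toNat.sqrt ≤ (n.toNat : Int) := by
    have := Nat.sqrt_le' n.toNat
    rw [pow_two] at this
    exact_mod_cast this
  unfold Int.sqrt
  rwa [Int.toNat_of_nonneg h] at h1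

theorem lt_isqrt_succ (n : Int) (h : 0 ≤ n) : n < (Int.sqrt n + 1) * (Int.sqrt n + 1) := by
  have h1 : (n.toNat : Int) < ((n.toNat.sqrt : Int) + 1) * (n.toNat.sqrt + 1) := by
    have := Nat.lt_succ_sqrt' n.toNat
    rw [pow_two] at this
    exact_mod_cast this
  unfold Int.sqrt
  rwa [Int.toNat_of_nonneg h] at h1

-- 2 * get_last_node l = (l+1)*l (the product is even, so Python's // 2 is exact halving)
theorem two_mul_last (l : Int) : 2 * get_last_node l = (l + 1) * l := by
  have he : Even (l * (l + 1)) := Int.even_mul_succ_self l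
  obtain ⟨t, ht⟩ := he
  have hm : (l + 1) * l = 2 * t := by ring_nf; ring_nf at ht; omega
  unfold get_last_node
  rw [PySem.Int.floordiv_eq_ediv_of_pos (by norm_num), hm]
  omega

theorem last_mono {l m : Int} (hl : 0 ≤ l) (hlm : l ≤ m) : get_last_node l ≤ get_last_node m := by
  have h1 := two_mul_last l
  have h2 := two_mul_last m
  nlinarith

-- A's binary search returns the unique level L with last(L-1) < n ≤ last(L), provided L ∈ [b,f].
theorem loopA_eq (k : Nat) : ∀ (n b f acc L : Int), (f + 1 - b).toNat ≤ k →
    2 ≤ b → 1 ≤ L →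
    get_last_node (L - 1) < n → n ≤ get_last_node L →
    b ≤ L → L ≤ f → loopA n b f acc = L := by
  induction k with
  | zero =>
    intro n b f acc L hk hb hL hlow hhigh hbL hLf
    omega
  | succ k ih =>
    intro n b f acc L hk hb hL hlow hhigh hbL hLf
    have hbf : b ≤ f := le_trans hbL hLf
    have hmid := PySem.Int.floordiv_two_mid_bounds hbf
    rw [loopA]
    simp only [dif_pos hbf]
    set l' := PySem.Int.floordiv (b + f) 2 with hl'
    by_cases hc : get_last_node l' ≥ n ∧ get_last_node (l' - 1) < n
    · -- the found midpoint must equal L, by monotonicity of get_last_node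
      simp only [if_pos hc]
      by_contra hne
      rcases lt_or_gt_of_ne hne with hlt | hgt
      · have : get_last_node l' ≤ get_last_node (L - 1) := last_mono (by omega) (by omega)
        omega
      · have : get_last_node L ≤ get_last_node (l' - 1) := last_mono (by omega) (by omega)
        omega
    · simp only [if_neg hc]
      by_cases hgt : get_last_node l' > n
      · -- last > n and the bracket test failed ⇒ last(l'-1) ≥ n ⇒ L ≤ l' - 1
        simp only [if_pos hgt]
        have hprev : n ≤ get_last_node (l' - 1) := by
          by_contra hp
          exact hc ⟨by omega, by omega⟩
        have hLle : L ≤ l' - 1 := by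
          by_contra hp
          have : get_last_node (l' - 1) ≤ get_last_node (L - 1) := last_mono (by omega) (by omega)
          omega
        exact ih n b (l' - 1) l' L (by omega) hb hL hlow hhigh hbL hLle
      · -- last ≤ n; if last = n the bracket test fires (last(l'-1) = last(l') - l' < n), so last < n ⇒ l' < L
        simp only [if_neg hgt]
        have hstep : get_last_node l' = get_last_node (l' - 1) + l' := by
          have h1 := two_mul_last l'
          have h2 := two_mul_last (l' - 1)
          nlinarith
        have hlt : get_last_node l' < n := by
          rcases lt_or_eq_of_le (by omega : get_last_node l' ≤ n) with h | h
          · exact h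
          · exact absurd ⟨by omega, by omega⟩ hc
        have hLge : l' + 1 ≤ L := by
          by_contra hp
          have : get_last_node L ≤ get_last_node l' := last_mono (by omega) (by omega)
          omega
        exact ih n (l' + 1) f l' L (by omega) (by omega) hL hlow hhigh hLge hLf

-- proof-side name for the level B computes
def altL (n : Int) : Int :=
  if PySem.Int.floordiv (PySem.Int.floordiv (Int.sqrt (8 * n + 1) - 1) 2 *
        (PySem.Int.floordiv (Int.sqrt (8 * n + 1) - 1) 2 + 1)) 2 < n
  then PySem.Int.floordiv (Int.sqrt (8 * n + 1) - 1) 2 + 1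
  else PySem.Int.floordiv (Int.sqrt (8 * n + 1) - 1) 2

theorem alt_eq (n : Int) :
    get_level_index_tuple_alt n = (altL n, n - PySem.Int.floordiv (altL n * (altL n - 1)) 2) := rfl

-- B's chosen level satisfies the bracket last(L-1) < n ≤ last(L), for n ≥ 1.
theorem alt_level_bracket (n : Int) (hn : 1 ≤ n) :
    get_last_node (altL n - 1) < n ∧ n ≤ get_last_node (altL n) ∧ 1 ≤ altL n := by
  have hm : (0 : Int) ≤ 8 * n + 1 := by omega
  have hle := isqrt_le (8 * n + 1) hm
  have hlt := lt_isqrt_succ (8 * n + 1) hm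
  have hs0 : 0 ≤ Int.sqrt (8 * n + 1) := Int.sqrt_nonneg _
  unfold altL
  simp only [PySem.Int.floordiv_eq_ediv_of_pos (show (0:Int) < 2 by norm_num)]
  set s := Int.sqrt (8 * n + 1) with hs
  have hs1 : 1 ≤ s := by nlinarith
  set l0 := (s - 1) / 2 with hl0
  have hb1 : 2 * l0 ≤ s - 1 := by omega
  have hb2 : s - 1 ≤ 2 * l0 + 1 := by omega
  have hl00 : 0 ≤ l0 := by omega
  have htri0 : 2 * get_last_node l0 = (l0 + 1) * l0 := two_mul_last l0
  have htrim : 2 * get_last_node (l0 - 1) = l0 * (l0 - 1) := by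
    have := two_mul_last (l0 - 1); linarith [this]
  have htri1 : 2 * get_last_node (l0 + 1) = (l0 + 2) * (l0 + 1) := by
    have := two_mul_last (l0 + 1); linarith [this]
  -- (2l0+1)² ≤ s² ≤ 8n+1 gives l0(l0+1) ≤ 2n
  have hss : (2 * l0 + 1) * (2 * l0 + 1) ≤ s * s := by nlinarith
  have hup : l0 * (l0 + 1) ≤ 2 * n := by nlinarith
  have hlow : get_last_node (l0 - 1) < n := by nlinarith
  -- 8n+1 < (s+1)² ≤ (2l0+3)² gives 2n ≤ (l0+1)(l0+2)
  have hss2 : (s + 1) * (s + 1) ≤ (2 * l0 + 3) * (2 * l0 + 3) := by nlinarith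
  have hhigh1 : n ≤ get_last_node (l0 + 1) := by nlinarith
  have hfl : l0 * (l0 + 1) / 2 = get_last_node l0 := by
    unfold get_last_node
    rw [PySem.Int.floordiv_eq_ediv_of_pos (by norm_num : (0:Int) < 2)]
    ring_nf
  rw [hfl]
  have hcancel : l0 + 1 - 1 = l0 := by ring
  by_cases hcase : get_last_node l0 < n
  · simp only [if_pos hcase, hcancel]
    exact ⟨hcase, hhigh1, by omega⟩
  · simp only [if_neg hcase]
    have hl01 : 1 ≤ l0 := by
      by_contra hp
      have h0 : l0 = 0 := by omega
      rw [h0] at htri0 hcase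
      have hz : get_last_node (0:Int) = 0 := by decide
      omega
    exact ⟨hlow, by omega, hl01⟩

-- The level is at most A's upper search bound 1 + ceil(sqrt(2n)).
theorem level_le_finish (n L : Int) (hn : 1 ≤ n) (hL : 1 ≤ L)
    (hlow : get_last_node (L - 1) < n) : L ≤ 1 + pvCeilSqrt (n * 2) := by
  have hm : (0 : Int) ≤ n * 2 := by omega
  have hle := isqrt_le (n * 2) hm
  have hlt := lt_isqrt_succ (n * 2) hm
  have hs0 := Int.sqrt_nonneg (n * 2)
  have htm := two_mul_last (L - 1)
  unfold pvCeilSqrt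
  set s := Int.sqrt (n * 2) with hs
  by_cases hsq : s * s = n * 2
  · simp only [if_pos hsq]
    nlinarith
  · simp only [if_neg hsq]
    nlinarith

-- the unique bracketed level: altL n = L for any L with the bracket (used for n = 1)
theorem altL_unique (n L : Int) (hn : 1 ≤ n) (hL : 1 ≤ L)
    (hlow : get_last_node (L - 1) < n) (hhigh : n ≤ get_last_node L) : altL n = L := by
  obtain ⟨hlow', hhigh', hL1'⟩ := alt_level_bracket n hn
  by_contra hne
  rcases lt_or_gt_of_ne hne with hlt | hgt
  · have : get_last_node (altL n) ≤ get_last_node (L - 1) := last_mono (by omega) (by omega)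
    omega
  · have : get_last_node L ≤ get_last_node (altL n - 1) := last_mono (by omega) (by omega)
    omega

-- ===== VERDICT (by name: the statement is the Claim_ definition above) =====
theorem get_level_index_tuple_spec : Claim_unchanged_get_level_index_tuple := by
  intro n hdom hpre hD
  unfold Pre_get_level_index_tuple at hpre
  unfold D_get_level_index_tuple at hD
  have hn : 1 ≤ n := by omega
  rw [alt_eq]
  by_cases h1 : n = 1
  · subst h1
    have hL1 : altL 1 = 1 :=
      altL_unique 1 1 (by norm_num) (by norm_num) (by decide) (by decide)
    rw [hL1]
    unfold get_level_index_tuple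
    decide
  · obtain ⟨hlow, hhigh, hL1⟩ := alt_level_bracket n hn
    have hL2 : 2 ≤ altL n := by
      by_contra hp
      have hLeq : altL n = 1 := by omega
      rw [hLeq] at hhigh
      have h11 : get_last_node 1 = 1 := by decide
      omega
    have hfin : altL n ≤ 1 + pvCeilSqrt (n * 2) := level_le_finish n (altL n) hn (by omega) hlow
    have hloop : loopA n 2 (1 + pvCeilSqrt (n * 2)) (-1000) = altL n :=
      loopA_eq (1 + pvCeilSqrt (n * 2) + 1 - 2).toNat n 2 _ (-1000) (altL n) (le_refl _)
        (le_refl _) (by omega) hlow hhigh hL2 hfin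
    unfold get_level_index_tuple
    simp only [if_neg h1]
    rw [hloop]

theorem get_level_index_tuple_changed : Claim_changed_get_level_index_tuple := by
  unfold Claim_changed_get_level_index_tuple
  unfold pvDiffWitness_get_level_index_tuple pvDiffWitnessOut_get_level_index_tuple
  have hs1 : Int.sqrt 1 = 1 := by
    have a := isqrt_le 1 (by norm_num)
    have b := lt_isqrt_succ 1 (by norm_num)
    have c := Int.sqrt_nonneg (1 : Int)
    nlinarith
  have hs0 : Int.sqrt 0 = 0 := by
    have a := isqrt_le 0 (by norm_num)
    have c := Int.sqrt_nonneg (0 : Int)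
    nlinarith
  refine ⟨by decide, by decide, by decide, ?_, ?_, by decide⟩
  · unfold get_level_index_tuple pvCeilSqrt
    norm_num [hs0]
    rw [loopA]
    norm_num
  · rw [alt_eq]
    have h0 : altL 0 = 0 := by
      unfold altL
      rw [show (8 * (0:Int) + 1) = 1 by norm_num, hs1]
      decide
    rw [h0]
    decide

theorem get_level_index_tuple_tight : Claim_exact_get_level_index_tuple := by
  intro n hdom hpre hD
  unfold D_get_level_index_tuple at hD
  subst hD
  have h := get_level_index_tuple_changed
  unfold Claim_changed_get_level_index_tuple at h
  unfold pvDiffWitness_get_level_index_tuple pvDiffWitnessOut_get_level_index_tuple at h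
  obtain ⟨-, -, -, hA, hB, hne⟩ := h
  rw [hA, hB]
  exact hne
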